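-- pv_equiv track=rewrite | github.com/jbrijs/topic-study | DSA/Graphs/BreadthFirstSearch/code/bfs.py | bfs
-- ===== SOURCE A (Python) =====
-- from collections import deque
--
-- def bfs(graph, source):
--
--     visited = set()
--     queue = deque()
--     queue.append(source)
--
--     while len(queue) > 0:
--         v = queue.popleft()
--         if v not in visited:
--             visited.add(v)
--             for u in graph[v]:
--                 if u not in visited:
--                     queue.append(u)
--
--     return visited
-- ===== SOURCE B (Python) =====
-- def bfs(graph, source):
--     visited = set()
--     frontier = {source}
--     while frontier:
--         new = {u for v in frontier for u in graph[v] if u not in visited}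
--         visited |= frontier
--         frontier = new - visited
--     return visited
-- ===== Notes on version B (the rewrite author's own statement) =====
-- stated objective: alternative
-- what changed: Replaces the one-node-at-a-time deque BFS (which re-checks visited at pop time and enqueues duplicates) by a level-synchronous set BFS that expands a whole frontier layer per iteration with set operations and never holds duplicates.
import Mathlib
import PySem

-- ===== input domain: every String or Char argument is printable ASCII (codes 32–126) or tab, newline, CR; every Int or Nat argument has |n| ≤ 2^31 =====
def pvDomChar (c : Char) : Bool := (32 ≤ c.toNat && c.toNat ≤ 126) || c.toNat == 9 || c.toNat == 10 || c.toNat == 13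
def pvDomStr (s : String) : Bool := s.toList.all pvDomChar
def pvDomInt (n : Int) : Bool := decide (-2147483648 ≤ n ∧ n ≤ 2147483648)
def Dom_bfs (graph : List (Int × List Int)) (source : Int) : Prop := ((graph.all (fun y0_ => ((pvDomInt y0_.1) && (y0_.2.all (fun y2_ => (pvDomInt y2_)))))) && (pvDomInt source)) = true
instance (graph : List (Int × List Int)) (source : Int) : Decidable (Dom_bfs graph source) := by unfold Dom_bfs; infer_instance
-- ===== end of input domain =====

-- B replaces A's one-node-at-a-time deque BFS by a level-synchronous set BFS that expands a whole
-- frontier layer per iteration (alternative decomposition; same asymptotic cost; return value only).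


-- ===== PORT A =====
-- graph[v] (Python dict lookup; a KeyError is excluded by Pre_bfs, under which the total form
-- getD with default [] coincides with the Python lookup).
def pvAdj (graph : List (Int × List Int)) (v : Int) : List Int :=
  PySem.Dict.getD (PySem.Dict.mk graph) v []

theorem pvAdj_nil (v : Int) : pvAdj [] v = [] := rfl

theorem pvAdj_cons (k : Int) (ns : List Int) (rest : List (Int × List Int)) (v : Int) :
    pvAdj ((k, ns) :: rest) v = if k = v then ns else pvAdj rest v := by
  simp only [pvAdj, PySem.Dict.getD]
  rw [PySem.Dict.get?_mk_cons]
  by_cases h : k = v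
  · simp [h]
  · simp [h]

theorem pvAdj_len_le (graph : List (Int × List Int)) (v : Int) :
    (pvAdj graph v).length ≤ (graph.flatMap Prod.snd).length := by
  induction graph with
  | nil => simp [pvAdj_nil]
  | cons e rest ih =>
    obtain ⟨k, ns⟩ := e
    rw [pvAdj_cons]
    simp only [List.flatMap_cons, List.length_append]
    split
    · omega
    · omega

theorem pvAdj_eq_nil_of_not_key (graph : List (Int × List Int)) (v : Int)
    (h : v ∉ graph.map Prod.fst) : pvAdj graph v = [] := by
  induction graph with
  | nil => rfl
  | cons e rest ih =>
    obtain ⟨k, ns⟩ := e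
    simp only [List.map_cons, List.mem_cons, not_or] at h
    rw [pvAdj_cons, if_neg (fun hh => h.1 hh.symm), ih h.2]

theorem pvFilterLenMono {α : Type} (l : List α) (p q : α → Bool)
    (h : ∀ x, p x = true → q x = true) : (l.filter p).length ≤ (l.filter q).length := by
  induction l with
  | nil => simp
  | cons a l ih =>
    simp only [List.filter_cons]
    by_cases hp : p a = true
    · rw [hp, h a hp]; simpa using ih
    · rw [Bool.not_eq_true] at hp
      rw [hp]
      cases hq : q a <;> simp <;> omega

theorem pvFilterLenLt {α : Type} (l : List α) (p q : α → Bool)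
    (h : ∀ x, p x = true → q x = true) (v : α) (hv : v ∈ l)
    (hp : p v = false) (hq : q v = true) :
    (l.filter p).length < (l.filter q).length := by
  induction l with
  | nil => simp at hv
  | cons a l ih =>
    simp only [List.filter_cons]
    rcases List.mem_cons.mp hv with rfl | hv'
    · rw [hp, hq]
      have := pvFilterLenMono l p q h
      simp
      omega
    · have hle := ih hv'
      by_cases hpa : p a = true
      · rw [hpa, h a hpa]; simpa using hle
      · rw [Bool.not_eq_true] at hpa
        rw [hpa]
        cases hqa : q a <;> simp <;> omega

def bfsLoopA (graph : List (Int × List Int)) : List Int → List Int → List Int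
  | visited, [] => visited
  | visited, v :: queue =>
    if v ∈ visited then bfsLoopA graph visited queue
    else
      bfsLoopA graph (PySem.Set.add visited v)
        (queue ++ (pvAdj graph v).filter (fun u => !decide (u ∈ PySem.Set.add visited v)))
termination_by visited queue =>
  ((graph.map Prod.fst).filter (fun x => !decide (x ∈ visited))).length
    * ((graph.flatMap Prod.snd).length + 1) + queue.length
decreasing_by
  · simp only [List.length_cons]
    omega
  · rename_i hv
    rw [PySem.Set.add_of_not_mem hv]
    have hmono : ∀ x : Int, (!decide (x ∈ visited ++ [v])) = true → (!decide (x ∈ visited)) = true := by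
      intro x hx; simp at hx ⊢; exact hx.1
    have happ : ((pvAdj graph v).filter (fun u => !decide (u ∈ visited ++ [v]))).length
        ≤ (graph.flatMap Prod.snd).length :=
      le_trans (List.length_filter_le _ _) (pvAdj_len_le graph v)
    simp only [List.length_append, List.length_cons]
    by_cases hk : v ∈ graph.map Prod.fst
    · have hlt := pvFilterLenLt (graph.map Prod.fst)
        (fun x => !decide (x ∈ visited ++ [v])) (fun x => !decide (x ∈ visited))
        hmono v hk (by simp) (by simp [hv])
      have hmul : (((graph.map Prod.fst).filter (fun x => !decide (x ∈ visited ++ [v]))).length + 1)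
          * ((graph.flatMap Prod.snd).length + 1)
          ≤ (((graph.map Prod.fst).filter (fun x => !decide (x ∈ visited))).length)
          * ((graph.flatMap Prod.snd).length + 1) :=
        Nat.mul_le_mul_right _ (Nat.succ_le_of_lt hlt)
      nlinarith [hmul, happ]
    · have hnil := pvAdj_eq_nil_of_not_key graph v hk
      have hle := pvFilterLenMono (graph.map Prod.fst)
        (fun x => !decide (x ∈ visited ++ [v])) (fun x => !decide (x ∈ visited)) hmono
      have hmul := Nat.mul_le_mul_right ((graph.flatMap Prod.snd).length + 1) hle
      rw [hnil]
      simp only [List.filter_nil, List.length_nil]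
      omega


def bfs (graph : List (Int × List Int)) (source : Int) : List Int :=
  bfsLoopA graph PySem.Set.empty [source]

-- ===== PORT B =====
-- while frontier: new = {u for v in frontier for u in graph[v] if u not in visited};
--                 visited |= frontier; frontier = new - visited
def bfsLoopB (graph : List (Int × List Int)) : Nat → List Int → List Int → List Int
  | 0, visited, _ => visited
  | fuel + 1, visited, frontier =>
    if frontier.isEmpty then visited
    else
      let newS := PySem.Set.ofList (frontier.flatMap (fun v =>
        (pvAdj graph v).filter (fun u => !decide (u ∈ visited))))
      let visited' := PySem.Set.union visited frontier
      bfsLoopB graph fuel visited' (PySem.Set.diff newS visited')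


def bfs_alt (graph : List (Int × List Int)) (source : Int) : List Int :=
  bfsLoopB graph (graph.length + 1) PySem.Set.empty (PySem.Set.add PySem.Set.empty source)

-- ===== PRECONDITION & SPEC =====
-- one expansion round of the reachable-set fixpoint; stops as soon as the set is adjacency-closed
def pvClosureIter (graph : List (Int × List Int)) : Nat → List Int → List Int
  | 0, S => S
  | n + 1, S =>
    let S' := PySem.Set.update S (S.flatMap (pvAdj graph))
    if S' = S then S else pvClosureIter graph n S'

-- the set of nodes reachable from source (the least adjacency-closed set containing it)
def pvClosure (graph : List (Int × List Int)) (source : Int) : List Int :=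
  pvClosureIter graph ((graph.flatMap Prod.snd).length + 1) [source]

-- Pre_bfs excludes exactly the inputs on which A raises KeyError: those where some node
-- reachable from the source has no adjacency entry in the dict.
def Pre_bfs (graph : List (Int × List Int)) (source : Int) : Prop :=
  ∀ n ∈ pvClosure graph source, n ∈ graph.map Prod.fst

instance (graph : List (Int × List Int)) (source : Int) : Decidable (Pre_bfs graph source) := by
  unfold Pre_bfs; infer_instance

def pvWitness_bfs : (List (Int × List Int)) × Int := ([(0, [1]), (1, [0, 2]), (2, [])], 0)

def Spec_bfs (graph : List (Int × List Int)) (source : Int) (out : List Int) : Prop := out = bfs_alt graph source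
instance (graph : List (Int × List Int)) (source : Int) (out : List Int) : Decidable (Spec_bfs graph source out) := by unfold Spec_bfs; infer_instance

-- ===== CLAIM (what is proved, stated in full; the proofs are below) =====
def Claim_equal_bfs : Prop := ∀ (graph : List (Int × List Int)) (source : Int), Dom_bfs graph source → Pre_bfs graph source → Spec_bfs graph source (bfs graph source)

-- ===== LEMMAS AND PROOFS =====

theorem pvAdj_mem_flatMap (graph : List (Int × List Int)) (v x : Int)
    (h : x ∈ pvAdj graph v) : x ∈ graph.flatMap Prod.snd := by
  induction graph with
  | nil => simp [pvAdj_nil] at h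
  | cons e rest ih =>
    obtain ⟨k, ns⟩ := e
    rw [pvAdj_cons] at h
    simp only [List.flatMap_cons, List.mem_append]
    by_cases hk : k = v
    · rw [if_pos hk] at h; exact Or.inl h
    · rw [if_neg hk] at h; exact Or.inr (ih h)


def popAll (graph : List (Int × List Int)) : List Int → List Int → List Int × List Int
  | _, [] => ([], [])
  | V, v :: Q =>
    if v ∈ V then popAll graph V Q
    else
      let p := popAll graph (V ++ [v]) Q
      (v :: p.1, (pvAdj graph v).filter (fun u => !decide (u ∈ V ++ [v])) ++ p.2)

theorem loopA_nil (graph : List (Int × List Int)) (V : List Int) :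
    bfsLoopA graph V [] = V := by rw [bfsLoopA]

theorem loopA_cons (graph : List (Int × List Int)) (V : List Int) (v : Int) (Q : List Int) :
    bfsLoopA graph V (v :: Q) =
      if v ∈ V then bfsLoopA graph V Q
      else bfsLoopA graph (V ++ [v])
        (Q ++ (pvAdj graph v).filter (fun u => !decide (u ∈ V ++ [v]))) := by
  rw [bfsLoopA]
  by_cases h : v ∈ V
  · simp [h]
  · simp only [if_neg h]
    rw [PySem.Set.add_of_not_mem h]

theorem loopA_all_visited (graph : List (Int × List Int)) (Q : List Int) :
    ∀ V, (∀ x ∈ Q, x ∈ V) → bfsLoopA graph V Q = V := by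
  induction Q with
  | nil => intro V _; exact loopA_nil graph V
  | cons v Q ih =>
    intro V h
    rw [loopA_cons, if_pos (h v (by simp))]
    exact ih V (fun x hx => h x (by simp [hx]))

theorem loopA_decomp (graph : List (Int × List Int)) (Q : List Int) :
    ∀ V R, bfsLoopA graph V (Q ++ R) =
      bfsLoopA graph (V ++ (popAll graph V Q).1) (R ++ (popAll graph V Q).2) := by
  induction Q with
  | nil => intro V R; simp [popAll]
  | cons v Q ih =>
    intro V R
    rw [List.cons_append, loopA_cons]
    by_cases h : v ∈ V
    · rw [if_pos h]
      simp only [popAll, if_pos h]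
      exact ih V R
    · rw [if_neg h]
      simp only [popAll, if_neg h]
      rw [List.append_assoc Q R]
      rw [ih (V ++ [v]) (R ++ (pvAdj graph v).filter (fun u => !decide (u ∈ V ++ [v])))]
      simp [List.append_assoc]

theorem ofList_filter (p : Int → Bool) (l : List Int) :
    (PySem.Set.ofList l).filter p = PySem.Set.ofList (l.filter p) := by
  induction l with
  | nil => rfl
  | cons x l ih =>
    by_cases hp : p x = true
    · simp only [PySem.Set.ofList_cons, List.filter_cons, hp, ite_true]
      rw [← ih]
      simp only [PySem.Set.discard, List.filter_filter]
      congr 1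
      apply List.filter_congr
      intro y _
      rw [Bool.and_comm]
    · rw [Bool.not_eq_true] at hp
      simp only [PySem.Set.ofList_cons, List.filter_cons, hp, Bool.false_eq_true, ite_false]
      rw [← ih]
      simp only [PySem.Set.discard, List.filter_filter]
      apply List.filter_congr
      intro y hy
      by_cases hyx : y = x
      · subst hyx; simp [hp]
      · simp [hyx]

theorem popAll_fst (graph : List (Int × List Int)) (Q : List Int) :
    ∀ V, (popAll graph V Q).1 = PySem.Set.ofList (Q.filter (fun x => !decide (x ∈ V))) := by
  induction Q with
  | nil => intro V; rfl
  | cons v Q ih =>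
    intro V
    by_cases h : v ∈ V
    · rw [List.filter_cons_of_neg (by simp [h])]
      simp only [popAll, if_pos h]
      exact ih V
    · rw [List.filter_cons_of_pos (by simp [h])]
      simp only [popAll, if_neg h]
      rw [PySem.Set.ofList_cons]
      simp only [PySem.Set.discard]
      rw [ofList_filter, List.filter_filter]
      rw [ih (V ++ [v])]
      congr 2
      apply List.filter_congr
      intro y _
      by_cases hyv : y = v <;> simp [hyv, h]

theorem popAll_snd_adj (graph : List (Int × List Int)) (Q : List Int) :
    ∀ V x, x ∈ (popAll graph V Q).2 → ∃ v, v ∈ (popAll graph V Q).1 ∧ x ∈ pvAdj graph v := by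
  induction Q with
  | nil => intro V x hx; simp [popAll] at hx
  | cons v Q ih =>
    intro V x hx
    by_cases h : v ∈ V
    · simp only [popAll, if_pos h] at hx ⊢
      exact ih V x hx
    · simp only [popAll, if_neg h, List.mem_append] at hx ⊢
      rcases hx with hx | hx
      · exact ⟨v, List.mem_cons_self .., List.mem_of_mem_filter hx⟩
      · obtain ⟨w, hw1, hw2⟩ := ih (V ++ [v]) x hx
        exact ⟨w, List.mem_cons_of_mem _ hw1, hw2⟩

theorem popAll_snd_filter (graph : List (Int × List Int)) (Q : List Int) :
    ∀ V (W : List Int), (∀ x ∈ V, x ∈ W) → (∀ x ∈ (popAll graph V Q).1, x ∈ W) →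
      (popAll graph V Q).2.filter (fun u => !decide (u ∈ W)) =
        ((popAll graph V Q).1.flatMap (pvAdj graph)).filter (fun u => !decide (u ∈ W)) := by
  induction Q with
  | nil => intro V W _ _; rfl
  | cons v Q ih =>
    intro V W hVW h1W
    by_cases h : v ∈ V
    · simp only [popAll, if_pos h] at h1W ⊢
      exact ih V W hVW h1W
    · simp only [popAll, if_neg h] at h1W ⊢
      have hvW : v ∈ W := h1W v (by simp)
      have hsub : ∀ x ∈ V ++ [v], x ∈ W := by
        intro x hx
        rcases List.mem_append.mp hx with hx | hx
        · exact hVW x hx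
        · simp at hx; subst hx; exact hvW
      rw [List.filter_append, List.flatMap_cons, List.filter_append]
      congr 1
      · rw [List.filter_filter]
        apply List.filter_congr
        intro y _
        by_cases hyW : y ∈ W
        · simp [hyW]
        · have : y ∉ V ++ [v] := fun hy => hyW (hsub y hy)
          simp [hyW, this]
      · exact ih (V ++ [v]) W hsub (fun x hx => h1W x (by simp [hx]))

theorem pvFilterFlatMap {α β : Type} (l : List α) (f : α → List β) (p : β → Bool) :
    (l.flatMap f).filter p = l.flatMap (fun a => (f a).filter p) := by
  induction l with
  | nil => rfl
  | cons a l ih => simp [List.flatMap_cons, List.filter_append, ih]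

theorem pvClosureIter_subset (graph : List (Int × List Int)) :
    ∀ (n : Nat) (S : List Int), ∀ x ∈ S, x ∈ pvClosureIter graph n S := by
  intro n
  induction n with
  | zero => intro S x hx; exact hx
  | succ n ih =>
    intro S x hx
    rw [pvClosureIter]
    by_cases h : PySem.Set.update S (S.flatMap (pvAdj graph)) = S
    · simp only [h, if_pos rfl]; exact hx
    · simp only [if_neg h]
      apply ih
      exact (PySem.Set.mem_update _ _ _).mpr (Or.inl hx)

theorem pvClosureIter_closed (graph : List (Int × List Int)) :
    ∀ (n : Nat) (S : List Int), S.Nodup →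
      ((graph.flatMap Prod.snd).filter (fun x => !decide (x ∈ S))).length < n →
      ∀ v ∈ pvClosureIter graph n S, ∀ u ∈ pvAdj graph v,
        u ∈ pvClosureIter graph n S := by
  intro n
  induction n with
  | zero => intro S _ hr; omega
  | succ n ih =>
    intro S hnd hr
    rw [pvClosureIter]
    by_cases h : PySem.Set.update S (S.flatMap (pvAdj graph)) = S
    · simp only [h, if_pos rfl]
      intro v hv u hu
      have hmem : u ∈ PySem.Set.update S (S.flatMap (pvAdj graph)) :=
        (PySem.Set.mem_update _ _ _).mpr (Or.inr (List.mem_flatMap.mpr ⟨v, hv, hu⟩))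
      rwa [h] at hmem
    · simp only [if_neg h]
      -- the update added at least one new element x0 ∈ flatMap snd, x0 ∉ S
      have hupd := PySem.Set.update_eq_append_filter S (S.flatMap (pvAdj graph))
      have hextra : (PySem.Set.ofList (S.flatMap (pvAdj graph))).filter
          (fun y => !(PySem.Set.contains S y)) ≠ [] := by
        intro hc
        apply h
        rw [hupd, hc, List.append_nil]
      obtain ⟨x0, hx0⟩ := List.exists_mem_of_ne_nil _ hextra
      have hx0flat : x0 ∈ S.flatMap (pvAdj graph) := by
        have := List.mem_of_mem_filter hx0
        exact (PySem.Set.mem_ofList _ _).mp this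
      have hx0S : x0 ∉ S := by
        have := (List.mem_filter.mp hx0).2
        intro hc
        rw [PySem.Set.contains_eq_listContains] at this
        simp [hc] at this
      have hx0U : x0 ∈ graph.flatMap Prod.snd := by
        obtain ⟨v, hv, hx⟩ := List.mem_flatMap.mp hx0flat
        exact pvAdj_mem_flatMap graph v x0 hx
      have hmono : ∀ x : Int,
          (!decide (x ∈ PySem.Set.update S (S.flatMap (pvAdj graph)))) = true →
          (!decide (x ∈ S)) = true := by
        intro x hx
        simp only [Bool.not_eq_true', decide_eq_false_iff_not] at hx ⊢
        exact fun hc => hx ((PySem.Set.mem_update _ _ _).mpr (Or.inl hc))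
      have hlt := pvFilterLenLt (graph.flatMap Prod.snd)
        (fun x => !decide (x ∈ PySem.Set.update S (S.flatMap (pvAdj graph))))
        (fun x => !decide (x ∈ S)) hmono x0 hx0U
        (by
          have : x0 ∈ PySem.Set.update S (S.flatMap (pvAdj graph)) :=
            (PySem.Set.mem_update _ _ _).mpr (Or.inr hx0flat)
          simp [this])
        (by simp [hx0S])
      exact ih _ (PySem.Set.nodup_update S _ hnd) (by omega)

theorem bfs_main (graph : List (Int × List Int)) (C : List Int)
    (hCK : ∀ n ∈ C, n ∈ graph.map Prod.fst)
    (hClosed : ∀ v ∈ C, ∀ u ∈ pvAdj graph v, u ∈ C) :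
    ∀ (fB : Nat) (V Q : List Int), (∀ x ∈ Q, x ∈ C) →
      ((graph.map Prod.fst).filter (fun x => !decide (x ∈ V))).length < fB →
      bfsLoopA graph V Q =
        bfsLoopB graph fB V (PySem.Set.ofList (Q.filter (fun x => !decide (x ∈ V)))) := by
  intro fB
  induction fB with
  | zero => intro V Q _ hr; omega
  | succ fB ih =>
    intro V Q hQ hr
    by_cases hFnil : Q.filter (fun x => !decide (x ∈ V)) = []
    · rw [bfsLoopB, hFnil]
      rw [if_pos (by rfl)]
      apply loopA_all_visited
      intro x hx
      by_contra hxV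
      have hmem : x ∈ Q.filter (fun x => !decide (x ∈ V)) :=
        List.mem_filter.mpr ⟨hx, by simp [hxV]⟩
      rw [hFnil] at hmem
      simp at hmem
    · obtain ⟨x0, hx0⟩ := List.exists_mem_of_ne_nil _ hFnil
      have hx0Q : x0 ∈ Q := (List.mem_filter.mp hx0).1
      have hx0V : x0 ∉ V := by
        have := (List.mem_filter.mp hx0).2; simpa using this
      have hFne : PySem.Set.ofList (Q.filter (fun x => !decide (x ∈ V))) ≠ [] := by
        intro hc
        have : x0 ∈ PySem.Set.ofList (Q.filter (fun x => !decide (x ∈ V))) :=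
          (PySem.Set.mem_ofList _ _).mpr hx0
        rw [hc] at this; simp at this
      set F := PySem.Set.ofList (Q.filter (fun x => !decide (x ∈ V))) with hFdef
      have hFsubQ : ∀ x ∈ F, x ∈ Q ∧ x ∉ V := by
        intro x hx
        have := (PySem.Set.mem_ofList _ _).mp hx
        have h2 := List.mem_filter.mp this
        exact ⟨h2.1, by simpa using h2.2⟩
      have hx0F : x0 ∈ F := (PySem.Set.mem_ofList _ _).mpr hx0
      -- unfold one B step
      rw [bfsLoopB]
      rw [if_neg (by simpa [List.isEmpty_iff] using hFne)]
      -- visited' = V ++ F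
      have hunion : PySem.Set.union V F = V ++ F := by
        rw [PySem.Set.union, PySem.Set.update_eq_append_of_disjoint]
        · exact PySem.Set.nodup_ofList _
        · exact fun x hx => (hFsubQ x hx).2
      -- A side: one layer
      have hdecomp := loopA_decomp graph Q V []
      rw [List.append_nil, List.nil_append] at hdecomp
      rw [popAll_fst, ← hFdef] at hdecomp
      rw [hdecomp]
      -- apply IH
      have hp2C : ∀ x ∈ (popAll graph V Q).2, x ∈ C := by
        intro x hx
        obtain ⟨v, hv1, hv2⟩ := popAll_snd_adj graph Q V x hx
        rw [popAll_fst, ← hFdef] at hv1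
        exact hClosed v (hQ v (hFsubQ v hv1).1) x hv2
      have hrlt : ((graph.map Prod.fst).filter (fun x => !decide (x ∈ V ++ F))).length <
          ((graph.map Prod.fst).filter (fun x => !decide (x ∈ V))).length := by
        apply pvFilterLenLt _ _ _ (by intro x hx; simp at hx ⊢; exact hx.1) x0
          (hCK x0 (hQ x0 hx0Q)) (by simp [hx0F]) (by simp [hx0V])
      have happly := ih (V ++ F) (popAll graph V Q).2 hp2C (by omega)
      rw [happly]
      -- match B's recursive-call arguments
      have hcont : ∀ S : List Int, S.filter (fun x => !(V ++ F).contains x) =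
          S.filter (fun x => !decide (x ∈ V ++ F)) := by
        intro S
        apply List.filter_congr
        intro y _
        simp
      have hsnd := popAll_snd_filter graph Q V (V ++ F)
        (fun x hx => by simp [hx])
        (by rw [popAll_fst, ← hFdef]; intro x hx; simp [hx])
      rw [popAll_fst, ← hFdef] at hsnd
      congr 1
      · rw [hunion]
      rw [hunion]
      show PySem.Set.ofList (List.filter (fun x => !decide (x ∈ V ++ F)) (popAll graph V Q).2) =
        List.filter (fun x => !(V ++ F).contains x)
          (PySem.Set.ofList (F.flatMap (fun v => (pvAdj graph v).filter (fun u => !decide (u ∈ V)))))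
      rw [hcont, ofList_filter, hsnd]
      congr 1
      rw [pvFilterFlatMap, pvFilterFlatMap]
      congr 1
      funext v
      rw [List.filter_filter]
      apply List.filter_congr
      intro y _
      by_cases hy : y ∈ V ++ F
      · simp [hy]
      · have hyV : y ∉ V := fun h => hy (by simp [h])
        simp [hy, hyV]


-- ===== VERDICT (by name: the statement is the Claim_ definition above) =====
theorem bfs_spec : Claim_equal_bfs := by
  intro graph source _hdom hpre
  have hCK := hpre
  unfold Spec_bfs bfs bfs_alt
  have hClosed : ∀ v ∈ pvClosure graph source, ∀ u ∈ pvAdj graph v, u ∈ pvClosure graph source := by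
    apply pvClosureIter_closed graph _ [source] (by simp)
    have := List.length_filter_le (fun x => !decide (x ∈ ([source] : List Int)))
      (graph.flatMap Prod.snd)
    omega
  have hsrcC : source ∈ pvClosure graph source :=
    pvClosureIter_subset graph _ [source] source (by simp)
  have h := bfs_main graph (pvClosure graph source) hCK hClosed (graph.length + 1)
    PySem.Set.empty [source]
    (by intro x hx; simp at hx; subst hx; exact hsrcC)
    (by simp [PySem.Set.empty])
  rw [h]
  rfl
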